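-- pv_equiv track=rewrite | github.com/burgerhex/histcord-clear-notifier | clears.py | save_state_as_grid
-- ===== SOURCE A (Python) =====
-- def save_state_as_grid(current_state):
--     player_names = set()
--     map_names = set()
--
--     for (player_name, map_name), value in current_state.items():
--         player_names.add(player_name)
--         map_names.add(map_name)
--
--     player_names = list(sorted(player_names))
--     map_names = list(sorted(map_names))
--
--     # add 1 to each index to account for the label row/col
--     player_col_indices = {player_name: i + 1 for i, player_name in enumerate(player_names)}
--     map_row_indices = {map_name: i + 1 for i, map_name in enumerate(map_names)}
--
--     num_players = len(player_names)
--
--     # top left cell should be empty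
--     header_row = [""] + player_names
--     map_rows = [[map_name] + [""] * num_players for map_name in map_names]
--     state_grid = [header_row] + map_rows
--
--     for (player_name, map_name), value in current_state.items():
--         col_index = player_col_indices[player_name]
--         row_index = map_row_indices[map_name]
--         state_grid[row_index][col_index] = value
--
--     return state_grid
-- ===== SOURCE B (Python) =====
-- def save_state_as_grid(current_state):
--     players = sorted({p for (p, m) in current_state})
--     maps = sorted({m for (p, m) in current_state})
--     return [[""] + players] + [
--         [m] + [current_state.get((p, m), "") for p in players] for m in maps
--     ]
-- ===== Notes on version B (the rewrite author's own statement) =====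
-- stated objective: idiomatic
-- what changed: Replaces the index-map construction (player/map -> row/col dicts) and the second scatter loop that mutates prefilled grid cells with a direct gather: each cell is produced in place by a first-match dict lookup current_state.get((player, map), ''), so the grid is built in one expression.
import Mathlib
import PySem

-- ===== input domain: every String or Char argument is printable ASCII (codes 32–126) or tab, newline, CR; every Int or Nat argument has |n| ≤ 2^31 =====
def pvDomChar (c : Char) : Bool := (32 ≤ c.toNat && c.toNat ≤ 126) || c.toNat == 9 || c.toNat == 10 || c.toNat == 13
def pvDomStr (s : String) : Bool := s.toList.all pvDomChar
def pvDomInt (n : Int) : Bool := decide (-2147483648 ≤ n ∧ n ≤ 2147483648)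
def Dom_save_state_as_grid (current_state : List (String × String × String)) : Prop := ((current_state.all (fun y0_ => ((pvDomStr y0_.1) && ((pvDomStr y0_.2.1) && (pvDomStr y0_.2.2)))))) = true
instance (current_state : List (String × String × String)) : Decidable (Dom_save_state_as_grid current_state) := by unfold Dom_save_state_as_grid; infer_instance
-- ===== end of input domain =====

-- B replaces A's index dicts + scatter loop over the entries by a direct gather:
-- each grid cell is a first-match dict lookup current_state.get((player, map), "").
-- The input dict is modelled as an association list; equality is claimed on lists
-- with pairwise-distinct (player, map) keys (Pre_), i.e. exactly those that
-- represent a dict.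

-- ===== PORT A =====
-- {name: i + 1 for i, name in enumerate(xs)}  (dict comprehension, kept as a helper)
def pvIdxDict (xs : List String) : PySem.Dict String Int :=
  PySem.Dict.ofList ((PySem.List.enumerate xs).map (fun q => (q.2, q.1 + 1)))

-- body of A's second loop: state_grid[row_index][col_index] = value.
-- The dict lookups use getD: the key was added to the corresponding set, so it is
-- always present and Python's KeyError can never fire.
def pvWriteCell (pci mri : PySem.Dict String Int) (g : List (List String))
    (t : String × String × String) : List (List String) :=
  let col := pci.getD t.1 0
  let row := mri.getD t.2.1 0
  PySem.List.pySetD g row (PySem.List.pySetD (PySem.List.pyGetD g row []) col t.2.2)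

def save_state_as_grid (current_state : List (String × String × String)) : List (List String) :=
  let sets := current_state.foldl
    (fun (s : PySem.Set String × PySem.Set String) t => (PySem.Set.add s.1 t.1, PySem.Set.add s.2 t.2.1))
    (PySem.Set.empty, PySem.Set.empty)
  let player_names := PySem.List.sorted sets.1 (fun x => x) false
  let map_names := PySem.List.sorted sets.2 (fun x => x) false
  let pci := pvIdxDict player_names
  let mri := pvIdxDict map_names
  let num_players := player_names.length
  let header_row := "" :: player_names
  let map_rows := map_names.map (fun m => m :: List.replicate num_players "")
  let state_grid := header_row :: map_rows
  current_state.foldl (pvWriteCell pci mri) state_grid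

-- ===== PORT B =====
-- current_state.get((p, m), ""): first-match lookup in the association list
def pvGetCell (cs : List (String × String × String)) (p m : String) : String :=
  match cs with
  | [] => ""
  | t :: rest => if t.1 = p ∧ t.2.1 = m then t.2.2 else pvGetCell rest p m

def save_state_as_grid_alt (current_state : List (String × String × String)) : List (List String) :=
  let players := PySem.List.sorted (PySem.Set.ofList (current_state.map (fun t => t.1))) (fun x => x) false
  let maps := PySem.List.sorted (PySem.Set.ofList (current_state.map (fun t => t.2.1))) (fun x => x) false
  ("" :: players) :: maps.map (fun m => m :: players.map (fun p => pvGetCell current_state p m))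

-- ===== PRECONDITION & SPEC =====
-- Pre_ excludes association lists with duplicate (player, map) keys: the Python
-- argument is a dict, whose keys are unique, so no such list represents an input
-- either Python program can receive.
def Pre_save_state_as_grid (current_state : List (String × String × String)) : Prop :=
  (current_state.map (fun t => (t.1, t.2.1))).Nodup
instance (current_state : List (String × String × String)) : Decidable (Pre_save_state_as_grid current_state) := by
  unfold Pre_save_state_as_grid; infer_instance

def pvWitness_save_state_as_grid : (List (String × String × String)) :=
  [("alice", "dust", "x"), ("bob", "dust", "y")]

def Spec_save_state_as_grid (current_state : List (String × String × String)) (out : List (List String)) : Prop := out = save_state_as_grid_alt current_state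
instance (current_state : List (String × String × String)) (out : List (List String)) : Decidable (Spec_save_state_as_grid current_state out) := by unfold Spec_save_state_as_grid; infer_instance

-- ===== CLAIM (what is proved, stated in full; the proofs are below) =====
def Claim_equal_save_state_as_grid : Prop := ∀ (current_state : List (String × String × String)), Dom_save_state_as_grid current_state → Pre_save_state_as_grid current_state → Spec_save_state_as_grid current_state (save_state_as_grid current_state)

-- ===== LEMMAS AND PROOFS =====

-- A's first loop builds the two sets of the two key projections
lemma pv_set_fold (cs : List (String × String × String)) :
    ∀ (a b : PySem.Set String),
      cs.foldl (fun (s : PySem.Set String × PySem.Set String) t =>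
          (PySem.Set.add s.1 t.1, PySem.Set.add s.2 t.2.1)) (a, b)
      = (PySem.Set.update a (cs.map (fun t => t.1)), PySem.Set.update b (cs.map (fun t => t.2.1))) := by
  induction cs with
  | nil => intro a b; simp [PySem.Set.update_nil]
  | cons t cs ih =>
    intro a b
    simp only [List.foldl_cons, List.map_cons, PySem.Set.update_cons]
    exact ih _ _

-- updating an empty dict with nodup-key pairs yields exactly those pairs
lemma pv_update_items {κ ν : Type} [BEq κ] [LawfulBEq κ] (ps : List (κ × ν)) :
    ∀ (d : PySem.Dict κ ν), (ps.map Prod.fst).Nodup →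
      (∀ k ∈ ps.map Prod.fst, d.contains k = false) →
      (d.update ps).items = d.items ++ ps := by
  induction ps with
  | nil => intro d _ _; simp [PySem.Dict.update]
  | cons q ps ih =>
    intro d hn h
    rw [List.map_cons, List.nodup_cons] at hn
    have h0 : d.contains q.1 = false := h q.1 (by simp)
    have hq : q.1 ∉ ps.map Prod.fst := hn.1
    have hstep : d.update (q :: ps) = (d.insert q.1 q.2).update ps := by
      simp [PySem.Dict.update]
    rw [hstep, ih _ hn.2 ?hrest,
      PySem.Dict.items_insert_of_not_contains d q.2 h0]
    · simp
    case hrest =>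
      intro k hk
      rw [PySem.Dict.contains_insert]
      have hne : k ≠ q.1 := fun hkq => hq (hkq ▸ hk)
      simp [hne, h k (by simp [hk])]

lemma pv_items_ofList {κ ν : Type} [BEq κ] [LawfulBEq κ] (ps : List (κ × ν))
    (hn : (ps.map Prod.fst).Nodup) : (PySem.Dict.ofList ps).items = ps := by
  have := pv_update_items ps PySem.Dict.empty hn (by intro k _; simp [PySem.Dict.contains_empty])
  simpa [PySem.Dict.ofList, PySem.Dict.empty] using this

-- the enumerate dict maps xs[j] to j + 1
lemma pv_idx (xs : List String) (hnd : xs.Nodup) (j : Nat) (hj : j < xs.length) :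
    (pvIdxDict xs).getD xs[j] 0 = (j : Int) + 1 := by
  have hkeys : ((PySem.List.enumerate xs).map (fun q => (q.2, q.1 + 1))).map Prod.fst = xs := by
    rw [List.map_map]
    exact PySem.List.map_snd_enumerate xs 0
  have hlen : ((PySem.List.enumerate xs).map (fun q => (q.2, q.1 + 1))).length = xs.length := by
    simp [PySem.List.length_enumerate]
  have hmem : (xs[j], (j : Int) + 1) ∈ (PySem.List.enumerate xs).map (fun q => (q.2, q.1 + 1)) := by
    have hj' : j < ((PySem.List.enumerate xs).map (fun q => (q.2, q.1 + 1))).length := by omega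
    have : ((PySem.List.enumerate xs).map (fun q => (q.2, q.1 + 1)))[j] = (xs[j], (j : Int) + 1) := by
      simp [PySem.List.getElem_enumerate]
    exact this ▸ List.getElem_mem hj'
  have hnd' : ((PySem.List.enumerate xs).map (fun q => (q.2, q.1 + 1))).map Prod.fst |>.Nodup := by
    rw [hkeys]; exact hnd
  unfold pvIdxDict
  refine PySem.Dict.getD_of_mem_items _ ?_ (PySem.Dict.nodup_keys_ofList _) 0
  rw [pv_items_ofList _ hnd']
  exact hmem

-- appending a fresh-key entry changes the first-match lookup only at its key
lemma pv_get_append (l : List (String × String × String)) (t : String × String × String)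
    (h : (t.1, t.2.1) ∉ l.map (fun u => (u.1, u.2.1))) (p m : String) :
    pvGetCell (l ++ [t]) p m = if t.1 = p ∧ t.2.1 = m then t.2.2 else pvGetCell l p m := by
  induction l with
  | nil => simp [pvGetCell]
  | cons u l ih =>
    simp only [List.cons_append, pvGetCell]
    by_cases hu : u.1 = p ∧ u.2.1 = m
    · rw [if_pos hu, if_pos hu]
      by_cases ht : t.1 = p ∧ t.2.1 = m
      · exfalso
        apply h
        simp only [List.map_cons, List.mem_cons]
        left
        rw [ht.1, ht.2, hu.1, hu.2]
      · rw [if_neg ht]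
    · have h' : (t.1, t.2.1) ∉ l.map (fun u => (u.1, u.2.1)) := by
        intro hm; exact h (by simp [hm])
      rw [if_neg hu, ih h', if_neg hu]

-- updating one position of a map over a nodup list = mapping a pointwise-updated function
lemma pv_map_set {β : Type} (P : List String) (hnd : P.Nodup) (f : String → β)
    (j : Nat) (hj : j < P.length) (v : β) :
    (P.map f).set j v = P.map (fun p => if p = P[j] then v else f p) := by
  apply List.ext_getElem
  · simp
  · intro k h1 h2
    have hk : k < P.length := by simpa using h2
    rw [List.getElem_set, List.getElem_map, List.getElem_map]
    by_cases hkj : j = k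
    · subst hkj; simp
    · rw [if_neg hkj, if_neg]
      intro hEq
      exact hkj ((List.Nodup.getElem_inj_iff hnd).mp hEq.symm)

-- the scatter loop over the prefilled grid produces exactly the gathered grid
lemma pv_main (P M : List String) (hP : P.Nodup) (hM : M.Nodup)
    (l : List (String × String × String))
    (hsub : ∀ t ∈ l, t.1 ∈ P ∧ t.2.1 ∈ M)
    (hnd : (l.map (fun t => (t.1, t.2.1))).Nodup) :
    l.foldl (pvWriteCell (pvIdxDict P) (pvIdxDict M))
        (("" :: P) :: M.map (fun m => m :: List.replicate P.length ""))
    = ("" :: P) :: M.map (fun m => m :: P.map (fun p => pvGetCell l p m)) := by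
  induction l using List.reverseRecOn with
  | nil => simp [pvGetCell, List.map_const']
  | append_singleton l t ih =>
    have hmapapp : ((l ++ [t]).map (fun u => (u.1, u.2.1)))
        = l.map (fun u => (u.1, u.2.1)) ++ [(t.1, t.2.1)] := by simp
    have hnd2 := hnd
    rw [hmapapp, List.nodup_append] at hnd2
    have hnd' : (l.map (fun u => (u.1, u.2.1))).Nodup := hnd2.1
    have hkey : (t.1, t.2.1) ∉ l.map (fun u => (u.1, u.2.1)) := by
      intro hmem
      exact hnd2.2.2 _ hmem _ (List.mem_singleton_self _) rfl
    have hsub' : ∀ u ∈ l, u.1 ∈ P ∧ u.2.1 ∈ M := fun u hu => hsub u (by simp [hu])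
    obtain ⟨hp, hm⟩ := hsub t (by simp)
    obtain ⟨jP, hjP, hPj⟩ := List.mem_iff_getElem.mp hp
    obtain ⟨jM, hjM, hMj⟩ := List.mem_iff_getElem.mp hm
    rw [List.foldl_append, List.foldl_cons, List.foldl_nil, ih hsub' hnd']
    have hcol : (pvIdxDict P).getD t.1 0 = (jP : Int) + 1 := by
      rw [← hPj]; exact pv_idx P hP jP hjP
    have hrow : (pvIdxDict M).getD t.2.1 0 = (jM : Int) + 1 := by
      rw [← hMj]; exact pv_idx M hM jM hjM
    simp only [pvWriteCell, hcol, hrow]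
    have htnM : ((jM : Int) + 1).toNat = jM + 1 := by omega
    have htnP : ((jP : Int) + 1).toNat = jP + 1 := by omega
    rw [PySem.List.pyGetD_eq_getElem _ [] (by omega) (by simp; omega),
      PySem.List.pySetD_of_nonneg _ _ (by omega),
      PySem.List.pySetD_of_nonneg _ _ (by omega)]
    simp only [htnM, htnP]
    have hjM' : jM < (M.map (fun m => m :: P.map (fun p => pvGetCell l p m))).length := by
      simpa using hjM
    rw [List.getElem_cons_succ, List.getElem_map, List.set_cons_succ, List.set_cons_succ,
      pv_map_set P hP _ jP hjP, pv_map_set M hM _ jM hjM]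
    congr 1
    apply List.map_congr_left
    intro m _
    by_cases hmm : m = M[jM]
    · subst hmm
      rw [if_pos rfl]
      congr 1
      apply List.map_congr_left
      intro p _
      rw [pv_get_append l t hkey]
      by_cases hpp : p = P[jP]
      · rw [if_pos hpp, if_pos ⟨by rw [hpp, hPj], hMj.symm⟩]
      · rw [if_neg hpp, if_neg]
        intro hc
        exact hpp (by rw [← hc.1, hPj])
    · rw [if_neg hmm]
      congr 1
      apply List.map_congr_left
      intro p _
      rw [pv_get_append l t hkey, if_neg]
      intro hc
      exact hmm (by rw [← hc.2, hMj])

-- strictly sorted lists are nodup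
lemma pv_sorted_nodup (xs : List String) :
    (PySem.List.sorted (PySem.Set.ofList xs) (fun x => x) false).Nodup :=
  (PySem.List.sorted_ofList_pairwise_lt xs).imp ne_of_lt

-- ===== VERDICT (by name: the statement is the Claim_ definition above) =====
theorem save_state_as_grid_spec : Claim_equal_save_state_as_grid := by
  intro cs _ hpre
  unfold Spec_save_state_as_grid
  unfold save_state_as_grid save_state_as_grid_alt
  simp only []
  rw [pv_set_fold cs PySem.Set.empty PySem.Set.empty]
  have hempty : (PySem.Set.empty : PySem.Set String) = [] := rfl
  rw [hempty, PySem.Set.update_nil_left, PySem.Set.update_nil_left]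
  exact pv_main _ _ (pv_sorted_nodup _) (pv_sorted_nodup _) cs
    (fun t ht => ⟨(PySem.List.mem_sorted _ _ _ _).mpr ((PySem.Set.mem_ofList _ _).mpr (List.mem_map_of_mem ht)),
                  (PySem.List.mem_sorted _ _ _ _).mpr ((PySem.Set.mem_ofList _ _).mpr (List.mem_map_of_mem ht))⟩)
    hpre
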